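-- pv_equiv track=rewrite | github.com/neoblazes/wonpago | play_go.py | IsCapturing
-- ===== SOURCE A (Python) =====
-- BLACK = 1
--
-- WHITE = 2
--
-- def NearPositions(x, y):
--   return [pos for pos in [(x-1, y), (x+1, y), (x, y-1), (x, y+1)]
--           if pos[0] > 0 and pos[0] < 10 and pos[1] > 0 and pos[1] < 10]
--
-- def GetConnented(board, group, x, y):
--   # TODO group = set()
--   group.add((x, y))
--   stone = board[y][x]
--   for pos in NearPositions(x, y):
--     if board[pos[1]][pos[0]] == stone and not (pos[0], pos[1]) in group:
--       GetConnented(board, group, pos[0], pos[1])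
--
-- def GetLibertySet(board, group):
--   liberty = set()
--   # It should check dup of liberty. Just ok to check 0 or Ko.
--   for pos in group:
--     for n_pos in NearPositions(pos[0], pos[1]):
--       if board[n_pos[1]][n_pos[0]] == 0:
--         liberty.add((n_pos[0], n_pos[1]))
--   return liberty
--
-- def GetLiberty(board, group):
--   return len(GetLibertySet(board, group))
--
-- def IsOpponentStone(target, source):
--   return target in (BLACK, WHITE) and target != source
--
-- def IsCapturing(board, turn, x, y):
--   for pos in NearPositions(x, y):
--     if IsOpponentStone(board[pos[1]][pos[0]], turn):
--       group = set()
--       GetConnented(board, group, pos[0], pos[1])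
--       liberty = GetLiberty(board, group)
--       if liberty == 1:
--         return True
--   return False
-- ===== SOURCE B (Python) =====
-- BLACK = 1
--
-- WHITE = 2
--
-- def NearPositions(x, y):
--   return [pos for pos in [(x-1, y), (x+1, y), (x, y-1), (x, y+1)]
--           if pos[0] > 0 and pos[0] < 10 and pos[1] > 0 and pos[1] < 10]
--
-- def IsCapturing(board, turn, x, y):
--   # For each opponent neighbor: one iterative flood fill (explicit stack,
--   # seen-set marked at push time) that collects the group's liberties
--   # into a single set while it expands; no recursion, no second pass.
--   for px, py in NearPositions(x, y):
--     stone = board[py][px]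
--     if stone in (BLACK, WHITE) and stone != turn:
--       stack = [(px, py)]
--       seen = {(px, py)}
--       liberties = set()
--       while stack:
--         cx, cy = stack.pop()
--         for nx, ny in NearPositions(cx, cy):
--           v = board[ny][nx]
--           if v == 0:
--             liberties.add((nx, ny))
--           elif v == stone and (nx, ny) not in seen:
--             seen.add((nx, ny))
--             stack.append((nx, ny))
--       if len(liberties) == 1:
--         return True
--   return False
-- ===== Notes on version B (the rewrite author's own statement) =====
-- stated objective: alternative
-- what changed: Replaces A's recursive DFS plus a separate second pass over the finished group that re-scans every member's neighbors for liberties with a single iterative flood fill (explicit stack, seen-set marked at push time) that collects the liberty set while it expands, so each group is traversed once instead of twice and no recursion is used.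
-- outside the precondition, e.g. on IsCapturing([[0, 0, 0], [0, 0, 0], [0, 0, 0]], 1, 1, 1): A returns False, B returns False
import Mathlib
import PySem

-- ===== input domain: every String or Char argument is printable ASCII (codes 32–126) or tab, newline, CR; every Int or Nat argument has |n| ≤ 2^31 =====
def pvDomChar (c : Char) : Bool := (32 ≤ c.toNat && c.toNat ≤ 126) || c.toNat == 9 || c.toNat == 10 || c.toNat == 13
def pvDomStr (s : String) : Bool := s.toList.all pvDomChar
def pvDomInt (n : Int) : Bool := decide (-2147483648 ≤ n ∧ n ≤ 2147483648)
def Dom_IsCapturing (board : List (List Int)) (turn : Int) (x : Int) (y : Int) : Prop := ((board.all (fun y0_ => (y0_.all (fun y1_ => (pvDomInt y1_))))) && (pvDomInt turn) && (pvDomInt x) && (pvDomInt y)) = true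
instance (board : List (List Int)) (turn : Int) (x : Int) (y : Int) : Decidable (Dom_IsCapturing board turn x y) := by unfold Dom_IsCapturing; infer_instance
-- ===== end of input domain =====

-- B replaces A's recursive DFS + second liberty pass over the finished group by ONE
-- iterative stack-based flood fill that collects the liberty set while expanding.

-- ===== PORT A =====

-- board[y][x]; exact under Pre_ (both indices are then in range 1..9 of a full board)
def cell (board : List (List Int)) (x y : Int) : Int :=
  PySem.List.pyGetD (PySem.List.pyGetD board y []) x 0

def nearPositions (x y : Int) : List (Int × Int) :=
  ([(x-1, y), (x+1, y), (x, y-1), (x, y+1)] : List (Int × Int)).filter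
    (fun pos => decide (pos.1 > 0) && decide (pos.1 < 10) && decide (pos.2 > 0) && decide (pos.2 < 10))

-- GetConnented; the fuel only makes the recursion total (200 > the 81 board cells,
-- so it never runs out — proved below)
def getConnected : Nat → List (List Int) → PySem.Set (Int × Int) → Int → Int → PySem.Set (Int × Int)
  | 0, _, group, _, _ => group
  | fuel+1, board, group, x, y =>
    let g0 := PySem.Set.add group (x, y)
    let stone := cell board x y
    (nearPositions x y).foldl
      (fun g pos =>
        if cell board pos.1 pos.2 == stone && !(PySem.Set.contains g pos) then
          getConnected fuel board g pos.1 pos.2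
        else g) g0

def getLibertySet (board : List (List Int)) (group : List (Int × Int)) : PySem.Set (Int × Int) :=
  group.foldl
    (fun lib pos =>
      (nearPositions pos.1 pos.2).foldl
        (fun lib n => if cell board n.1 n.2 == 0 then PySem.Set.add lib n else lib) lib)
    PySem.Set.empty

def getLiberty (board : List (List Int)) (group : List (Int × Int)) : Int :=
  PySem.Set.len (getLibertySet board group)

def isOpponentStone (target source : Int) : Bool :=
  (target == 1 || target == 2) && !(target == source)

def isCapturingGo (board : List (List Int)) (turn : Int) : List (Int × Int) → Bool
  | [] => false
  | pos :: rest =>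
    if isOpponentStone (cell board pos.1 pos.2) turn then
      if getLiberty board (getConnected 200 board PySem.Set.empty pos.1 pos.2) == 1 then true
      else isCapturingGo board turn rest
    else isCapturingGo board turn rest

def IsCapturing (board : List (List Int)) (turn : Int) (x : Int) (y : Int) : Bool :=
  isCapturingGo board turn (nearPositions x y)

-- ===== PORT B =====

-- one step of the inner 'for nx, ny in NearPositions(cx, cy)' loop of Source B;
-- state = (stack, seen, liberties)
def fillStep (board : List (List Int)) (stone : Int)
    (acc : List (Int × Int) × PySem.Set (Int × Int) × PySem.Set (Int × Int)) (n : Int × Int) :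
    List (Int × Int) × PySem.Set (Int × Int) × PySem.Set (Int × Int) :=
  let v := cell board n.1 n.2
  if v == 0 then (acc.1, acc.2.1, PySem.Set.add acc.2.2 n)
  else if v == stone && !(PySem.Set.contains acc.2.1 n) then
    (n :: acc.1, PySem.Set.add acc.2.1 n, acc.2.2)
  else acc

-- the while loop of Source B; fuel 200 only makes it total (measure ≤ 163, proved below)
def fillLoop : Nat → List (List Int) → Int → List (Int × Int) → PySem.Set (Int × Int) →
    PySem.Set (Int × Int) → PySem.Set (Int × Int) × PySem.Set (Int × Int)
  | 0, _, _, _, seen, lib => (seen, lib)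
  | _+1, _, _, [], seen, lib => (seen, lib)
  | fuel+1, board, stone, c :: stack, seen, lib =>
    let st := (nearPositions c.1 c.2).foldl (fillStep board stone) (stack, seen, lib)
    fillLoop fuel board stone st.1 st.2.1 st.2.2

def altLoop (board : List (List Int)) (turn : Int) : List (Int × Int) → Bool
  | [] => false
  | p :: rest =>
    let stone := cell board p.1 p.2
    if (stone == 1 || stone == 2) && !(stone == turn) then
      let r := fillLoop 200 board stone [p] (PySem.Set.add PySem.Set.empty p) PySem.Set.empty
      if PySem.Set.len r.2 == 1 then true else altLoop board turn rest
    else altLoop board turn rest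

def IsCapturing_alt (board : List (List Int)) (turn : Int) (x : Int) (y : Int) : Bool :=
  altLoop board turn (nearPositions x y)

-- ===== PRECONDITION & SPEC =====

-- NearPositions(x, y) ≠ [] as plain arithmetic on x, y
def pvHasNear (x : Int) (y : Int) : Prop :=
  (0 < y ∧ y < 10 ∧ ((0 < x - 1 ∧ x - 1 < 10) ∨ (0 < x + 1 ∧ x + 1 < 10))) ∨
  (0 < x ∧ x < 10 ∧ ((0 < y - 1 ∧ y - 1 < 10) ∨ (0 < y + 1 ∧ y + 1 < 10)))

-- A raises IndexError on boards missing a cell it reads (the playable area is rows/cols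
-- 1..9). Which cells the flood fill reads is data-dependent, so Pre_ demands the whole
-- playable area whenever any neighbor of (x, y) is on it: this is slightly narrower than
-- "A returns" — A also returns on smaller boards whose missing cells it happens never to
-- read (see claim cites); B returns the same value on those.
def Pre_IsCapturing (board : List (List Int)) (turn : Int) (x : Int) (y : Int) : Prop :=
  pvHasNear x y → (10 ≤ board.length ∧ ∀ row ∈ (board.drop 1).take 9, 10 ≤ row.length)

instance (board : List (List Int)) (turn : Int) (x : Int) (y : Int) :
    Decidable (Pre_IsCapturing board turn x y) := by unfold Pre_IsCapturing pvHasNear; infer_instance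

def pvWitness_IsCapturing : List (List Int) × Int × Int × Int :=
  (List.replicate 10 (List.replicate 10 0), 1, 1, 1)

def Spec_IsCapturing (board : List (List Int)) (turn : Int) (x : Int) (y : Int) (out : Bool) : Prop := out = IsCapturing_alt board turn x y
instance (board : List (List Int)) (turn : Int) (x : Int) (y : Int) (out : Bool) : Decidable (Spec_IsCapturing board turn x y out) := by unfold Spec_IsCapturing; infer_instance

-- ===== CLAIM (what is proved, stated in full; the proofs are below) =====
def Claim_equal_IsCapturing : Prop := ∀ (board : List (List Int)) (turn : Int) (x : Int) (y : Int), Dom_IsCapturing board turn x y → Pre_IsCapturing board turn x y → Spec_IsCapturing board turn x y (IsCapturing board turn x y)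

-- ===== LEMMAS AND PROOFS =====

-- the 81 playable cells
def cellsList : List (Int × Int) :=
  (List.range 81).map (fun k => (((k / 9 : Nat) : Int) + 1, ((k % 9 : Nat) : Int) + 1))

def missing (seen : List (Int × Int)) : Nat :=
  (cellsList.filter (fun c => !PySem.Set.contains seen c)).length

def Adj (board : List (List Int)) (stone : Int) (p q : Int × Int) : Prop :=
  q ∈ nearPositions p.1 p.2 ∧ cell board q.1 q.2 = stone

def Reach (board : List (List Int)) (stone : Int) (s c : Int × Int) : Prop :=
  Relation.ReflTransGen (Adj board stone) s c

def LibSpec (board : List (List Int)) (stone : Int) (s : Int × Int) (q : Int × Int) : Prop :=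
  ∃ p, Reach board stone s p ∧ q ∈ nearPositions p.1 p.2 ∧ cell board q.1 q.2 = 0

-- unfolding equations
theorem getConnected_succ (f : Nat) (board : List (List Int)) (g : PySem.Set (Int × Int)) (x y : Int) :
    getConnected (f+1) board g x y =
      (nearPositions x y).foldl
        (fun g pos =>
          if cell board pos.1 pos.2 == cell board x y && !(PySem.Set.contains g pos) then
            getConnected f board g pos.1 pos.2
          else g) (PySem.Set.add g (x, y)) := rfl

theorem fillLoop_cons (f : Nat) (board : List (List Int)) (stone : Int) (c : Int × Int)
    (st : List (Int × Int)) (sn lb : PySem.Set (Int × Int)) :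
    fillLoop (f+1) board stone (c :: st) sn lb =
      fillLoop f board stone
        ((nearPositions c.1 c.2).foldl (fillStep board stone) (st, sn, lb)).1
        ((nearPositions c.1 c.2).foldl (fillStep board stone) (st, sn, lb)).2.1
        ((nearPositions c.1 c.2).foldl (fillStep board stone) (st, sn, lb)).2.2 := rfl

theorem fillStep_eq (board : List (List Int)) (stone : Int) (st : List (Int × Int))
    (sn lb : PySem.Set (Int × Int)) (n : Int × Int) :
    fillStep board stone (st, sn, lb) n =
      if cell board n.1 n.2 == 0 then (st, sn, PySem.Set.add lb n)
      else if cell board n.1 n.2 == stone && !(PySem.Set.contains sn n) then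
        (n :: st, PySem.Set.add sn n, lb)
      else (st, sn, lb) := rfl

-- generic fold invariant
theorem foldl_inv {alpha beta : Type} (l : List alpha) (f : beta → alpha → beta) (P : beta → Prop)
    (hf : ∀ b a, a ∈ l → P b → P (f b a)) : ∀ b, P b → P (l.foldl f b) := by
  induction l with
  | nil => intro b h; simpa
  | cons a l ih =>
    intro b h
    exact ih (fun b' a' ha' => hf b' a' (List.mem_cons_of_mem _ ha')) _
      (hf b a (List.mem_cons_self ..) h)

theorem band_true {a b : Bool} : (a && b) = true ↔ a = true ∧ b = true := by
  cases a <;> cases b <;> simp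

theorem bor_true {a b : Bool} : (a || b) = true ↔ a = true ∨ b = true := by
  cases a <;> cases b <;> simp

theorem bnot_true {a : Bool} : (!a) = true ↔ a = false := by cases a <;> simp

-- membership facts
theorem mem_cellsList_iff (q : Int × Int) :
    q ∈ cellsList ↔ 0 < q.1 ∧ q.1 < 10 ∧ 0 < q.2 ∧ q.2 < 10 := by
  obtain ⟨a, b⟩ := q
  simp only [cellsList, List.mem_map, List.mem_range, Prod.mk.injEq]
  constructor
  · rintro ⟨k, hk, h1, h2⟩
    refine ⟨?_, ?_, ?_, ?_⟩ <;> omega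
  · rintro ⟨h1, h2, h3, h4⟩
    exact ⟨(a - 1).toNat * 9 + (b - 1).toNat, by omega, by omega, by omega⟩

theorem mem_near_iff (x y : Int) (q : Int × Int) :
    q ∈ nearPositions x y ↔
      (q ∈ ([(x-1, y), (x+1, y), (x, y-1), (x, y+1)] : List (Int × Int)) ∧
        0 < q.1 ∧ q.1 < 10 ∧ 0 < q.2 ∧ q.2 < 10) := by
  simp only [nearPositions, List.mem_filter, Bool.and_eq_true, decide_eq_true_eq]
  tauto

theorem mem_near_cells {x y : Int} {q : Int × Int} (h : q ∈ nearPositions x y) : q ∈ cellsList := by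
  rw [mem_near_iff] at h
  rw [mem_cellsList_iff]
  tauto

-- filter-length counting
theorem filter_length_mono {alpha : Type} {l : List alpha} {p1 p2 : alpha → Bool}
    (h : ∀ a, p2 a = true → p1 a = true) : (l.filter p2).length ≤ (l.filter p1).length := by
  induction l with
  | nil => simp
  | cons a l ih =>
    rw [List.filter_cons, List.filter_cons]
    by_cases h2 : p2 a = true
    · rw [if_pos h2, if_pos (h a h2)]
      simpa using ih
    · rw [if_neg h2]
      by_cases h1 : p1 a = true
      · rw [if_pos h1]; simp only [List.length_cons]; omega
      · rw [if_neg h1]; exact ih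

theorem filter_length_strict {alpha : Type} {l : List alpha} {p1 p2 : alpha → Bool} {q : alpha}
    (hq : q ∈ l) (h1 : p1 q = true) (h2 : p2 q = false)
    (hm : ∀ a, p2 a = true → p1 a = true) :
    (l.filter p2).length < (l.filter p1).length := by
  induction l with
  | nil => cases hq
  | cons a l ih =>
    rw [List.filter_cons, List.filter_cons]
    rcases List.mem_cons.mp hq with rfl | hq'
    · rw [if_pos h1, if_neg (by rw [h2]; simp)]
      simp only [List.length_cons]
      have := filter_length_mono (l := l) hm
      omega
    · by_cases c2 : p2 a = true
      · rw [if_pos c2, if_pos (hm a c2)]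
        simp only [List.length_cons]
        exact Nat.succ_lt_succ (ih hq')
      · rw [if_neg c2]
        by_cases c1 : p1 a = true
        · rw [if_pos c1]
          simp only [List.length_cons]
          have := ih hq'
          omega
        · rw [if_neg c1]; exact ih hq'

theorem contains_false_of_not_mem {s : PySem.Set (Int × Int)} {q : Int × Int} (h : q ∉ s) :
    PySem.Set.contains s q = false := by
  cases hcb : PySem.Set.contains s q
  · rfl
  · exact absurd ((PySem.Set.contains_iff s q).mp hcb) h

theorem missing_le (s : List (Int × Int)) : missing s ≤ 81 := by
  have h1 : cellsList.length = 81 := by rfl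
  have := List.length_filter_le (fun c => !PySem.Set.contains s c) cellsList
  unfold missing
  omega

theorem missing_mono {s t : List (Int × Int)} (h : ∀ c ∈ s, c ∈ t) : missing t ≤ missing s := by
  apply filter_length_mono
  intro a ha
  rw [bnot_true] at ha ⊢
  by_cases hm : a ∈ s
  · rw [(PySem.Set.contains_iff t a).mpr (h a hm)] at ha
    exact absurd ha (by simp)
  · exact contains_false_of_not_mem hm

theorem missing_add_lt {s : List (Int × Int)} {q : Int × Int}
    (hq : q ∈ cellsList) (hns : q ∉ s) : missing (PySem.Set.add s q) < missing s := by
  apply filter_length_strict (q := q) hq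
  · rw [bnot_true]
    exact contains_false_of_not_mem hns
  · have h1 : PySem.Set.contains (PySem.Set.add s q) q = true :=
      (PySem.Set.contains_iff _ q).mpr ((PySem.Set.mem_add ..).mpr (Or.inr rfl))
    rw [h1]
    rfl
  · intro a ha
    rw [bnot_true] at ha ⊢
    by_cases hm : a ∈ s
    · rw [(PySem.Set.contains_iff _ a).mpr ((PySem.Set.mem_add ..).mpr (Or.inl hm))] at ha
      exact absurd ha (by simp)
    · exact contains_false_of_not_mem hm

-- ---- A side ----

theorem getConnected_mono (fuel : Nat) (board : List (List Int)) (g : PySem.Set (Int × Int))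
    (x y : Int) : ∀ c ∈ g, c ∈ getConnected fuel board g x y := by
  induction fuel generalizing g x y with
  | zero => intro c hc; simpa [getConnected]
  | succ f ih =>
    intro c hc
    rw [getConnected_succ]
    refine foldl_inv _ _ (fun g' => c ∈ g') ?_ _ ((PySem.Set.mem_add ..).mpr (Or.inl hc))
    intro g' a _ hc'
    dsimp only
    split
    · exact ih g' a.1 a.2 c hc'
    · exact hc'

theorem getConnected_start (fuel : Nat) (board : List (List Int)) (g : PySem.Set (Int × Int))
    (x y : Int) : (x, y) ∈ getConnected (fuel+1) board g x y := by
  rw [getConnected_succ]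
  refine foldl_inv _ _ (fun g' => (x, y) ∈ g') ?_ _ ((PySem.Set.mem_add ..).mpr (Or.inr rfl))
  intro g' a _ hc'
  dsimp only
  split
  · exact getConnected_mono fuel board g' a.1 a.2 _ hc'
  · exact hc'

theorem getConnected_sound (fuel : Nat) (board : List (List Int)) (g : PySem.Set (Int × Int))
    (x y : Int) : ∀ c ∈ getConnected fuel board g x y,
      c ∈ g ∨ Reach board (cell board x y) (x, y) c := by
  induction fuel generalizing g x y with
  | zero => intro c hc; left; simpa [getConnected] using hc
  | succ f ih =>
    rw [getConnected_succ]
    refine foldl_inv _ _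
      (fun g' : PySem.Set (Int × Int) =>
        ∀ c ∈ g', c ∈ g ∨ Reach board (cell board x y) (x, y) c) ?_ _ ?_
    · intro g' a ha hP c hc
      by_cases hcond : (cell board a.1 a.2 == cell board x y && !PySem.Set.contains g' a) = true
      · rw [if_pos hcond] at hc
        obtain ⟨hceq, -⟩ := band_true.mp hcond
        have hceq' : cell board a.1 a.2 = cell board x y := by simpa using hceq
        rcases ih g' a.1 a.2 c hc with hin | hr
        · exact hP c hin
        · right
          rw [hceq'] at hr
          exact Relation.ReflTransGen.trans (Relation.ReflTransGen.single ⟨ha, hceq'⟩) hr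
      · rw [if_neg hcond] at hc
        exact hP c hc
    · intro c hc
      rcases (PySem.Set.mem_add ..).mp hc with hin | rfl
      · exact Or.inl hin
      · exact Or.inr Relation.ReflTransGen.refl

theorem getConnected_closed (fuel : Nat) (board : List (List Int)) (g : PySem.Set (Int × Int))
    (x y : Int) (hfuel : missing g < fuel) (hcell : (x, y) ∈ cellsList) (hxy : (x, y) ∉ g) :
    ∀ c ∈ getConnected fuel board g x y, c ∉ g →
      ∀ q ∈ nearPositions c.1 c.2, cell board q.1 q.2 = cell board x y →
        q ∈ getConnected fuel board g x y := by
  induction fuel generalizing g x y with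
  | zero => omega
  | succ f ih =>
    rw [getConnected_succ]
    have hmissadd : missing (PySem.Set.add g (x, y)) < missing g := missing_add_lt hcell hxy
    -- aux: fold invariant with pending list
    have aux : ∀ (l : List (Int × Int)) (g' : PySem.Set (Int × Int)),
        (∀ a ∈ l, a ∈ nearPositions x y) →
        (∀ c ∈ PySem.Set.add g (x, y), c ∈ g') →
        (∀ c ∈ g', c ∉ g →
          ∀ q ∈ nearPositions c.1 c.2, cell board q.1 q.2 = cell board x y →
            (q ∈ g' ∨ (c = (x, y) ∧ q ∈ l))) →
        ∀ c ∈ (l.foldl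
            (fun g pos =>
              if cell board pos.1 pos.2 == cell board x y && !(PySem.Set.contains g pos) then
                getConnected f board g pos.1 pos.2
              else g) g'), c ∉ g →
          ∀ q ∈ nearPositions c.1 c.2, cell board q.1 q.2 = cell board x y →
            q ∈ (l.foldl
              (fun g pos =>
                if cell board pos.1 pos.2 == cell board x y && !(PySem.Set.contains g pos) then
                  getConnected f board g pos.1 pos.2
                else g) g') := by
      intro l
      induction l with
      | nil =>
        intro g' _ _ hInv c hc hcg q hq hcq
        simp only [List.foldl_nil] at *
        rcases hInv c hc hcg q hq hcq with h | ⟨-, h⟩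
        · exact h
        · cases h
      | cons a l' ihl =>
        intro g' hsub hg0 hInv
        simp only [List.foldl_cons]
        by_cases hcond : (cell board a.1 a.2 == cell board x y && !PySem.Set.contains g' a) = true
        · rw [if_pos hcond]
          obtain ⟨hceq, hnc⟩ := band_true.mp hcond
          have hceq' : cell board a.1 a.2 = cell board x y := by simpa using hceq
          have hang' : a ∉ g' := by
            intro hmem
            rw [(PySem.Set.contains_iff g' a).mpr hmem] at hnc
            simp at hnc
          have hacells : a ∈ cellsList := mem_near_cells (hsub a (List.mem_cons_self ..))
          have hmissg' : missing g' < f := by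
            have h1 : missing g' ≤ missing (PySem.Set.add g (x, y)) := missing_mono hg0
            omega
          have hcallmono := getConnected_mono f board g' a.1 a.2
          have hcallclosed := ih g' a.1 a.2 hmissg' (by simpa using hacells) hang'
          obtain ⟨f', rfl⟩ : ∃ f', f = f' + 1 := ⟨f - 1, by omega⟩
          have hstart : (a.1, a.2) ∈ getConnected (f'+1) board g' a.1 a.2 :=
            getConnected_start f' board g' a.1 a.2
          apply ihl
          · intro b hb; exact hsub b (List.mem_cons_of_mem _ hb)
          · intro c hc; exact hcallmono c (hg0 c hc)
          · intro c hc hcg q hq hcq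
            by_cases hcg' : c ∈ g'
            · rcases hInv c hcg' hcg q hq hcq with h | ⟨rfl, h⟩
              · exact Or.inl (hcallmono q h)
              · rcases List.mem_cons.mp h with rfl | h'
                · left; simpa using hstart
                · exact Or.inr ⟨rfl, h'⟩
            · left
              exact hcallclosed c hc hcg' q hq (by rw [hcq, hceq'])
        · rw [if_neg hcond]
          apply ihl
          · intro b hb; exact hsub b (List.mem_cons_of_mem _ hb)
          · exact hg0
          · intro c hc hcg q hq hcq
            rcases hInv c hc hcg q hq hcq with h | ⟨rfl, h⟩
            · exact Or.inl h
            · rcases List.mem_cons.mp h with rfl | h'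
              · -- q = a: condition failed, so cell a ≠ stone or a ∈ g'
                by_cases hmem : PySem.Set.contains g' q = true
                · exact Or.inl ((PySem.Set.contains_iff g' q).mp hmem)
                · exfalso
                  apply hcond
                  rw [band_true]
                  have hcf : PySem.Set.contains g' q = false := by
                    revert hmem; cases PySem.Set.contains g' q <;> simp
                  rw [hcf]
                  exact ⟨by simpa using hcq, rfl⟩
              · exact Or.inr ⟨rfl, h'⟩
    apply aux
    · intro a ha; exact ha
    · intro c hc; exact hc
    · intro c hc hcg q hq hcq
      rcases (PySem.Set.mem_add ..).mp hc with h | rfl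
      · exact absurd h hcg
      · exact Or.inr ⟨rfl, hq⟩

theorem missing_empty : missing PySem.Set.empty = 81 := by rfl

theorem getConnected_spec (board : List (List Int)) (sx sy : Int)
    (h : (sx, sy) ∈ cellsList) :
    ∀ c, c ∈ getConnected 200 board PySem.Set.empty sx sy ↔
      Reach board (cell board sx sy) (sx, sy) c := by
  intro c
  constructor
  · intro hc
    rcases getConnected_sound 200 board PySem.Set.empty sx sy c hc with hin | hr
    · cases hin
    · exact hr
  · intro hr
    induction hr with
    | refl => exact getConnected_start 199 board PySem.Set.empty sx sy
    | tail hab hadj ihb =>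
      exact getConnected_closed 200 board PySem.Set.empty sx sy
        (by rw [missing_empty]; omega) h (by simp [PySem.Set.empty])
        _ ihb (by simp [PySem.Set.empty]) _ hadj.1 hadj.2

theorem mem_libInner (board : List (List Int)) (l : List (Int × Int)) :
    ∀ (lib : PySem.Set (Int × Int)) (q : Int × Int),
      q ∈ l.foldl (fun lib n => if cell board n.1 n.2 == 0 then PySem.Set.add lib n else lib) lib ↔
        q ∈ lib ∨ (q ∈ l ∧ cell board q.1 q.2 = 0) := by
  induction l with
  | nil => intro lib q; simp
  | cons a l' ih =>
    intro lib q
    simp only [List.foldl_cons]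
    by_cases hc : cell board a.1 a.2 = 0
    · rw [if_pos (by simpa using hc), ih]
      simp only [PySem.Set.mem_add, List.mem_cons]
      constructor
      · rintro ((h | rfl) | ⟨h1, h2⟩)
        · exact Or.inl h
        · exact Or.inr ⟨Or.inl rfl, hc⟩
        · exact Or.inr ⟨Or.inr h1, h2⟩
      · rintro (h | ⟨(rfl | h1), h2⟩)
        · exact Or.inl (Or.inl h)
        · exact Or.inl (Or.inr rfl)
        · exact Or.inr ⟨h1, h2⟩
    · rw [if_neg (by simpa using hc), ih]
      constructor
      · rintro (h | ⟨h1, h2⟩)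
        · exact Or.inl h
        · exact Or.inr ⟨List.mem_cons_of_mem _ h1, h2⟩
      · rintro (h | ⟨h1, h2⟩)
        · exact Or.inl h
        · rcases List.mem_cons.mp h1 with rfl | h1'
          · exact absurd h2 hc
          · exact Or.inr ⟨h1', h2⟩

theorem mem_libOuter (board : List (List Int)) (group : List (Int × Int)) :
    ∀ (lib : PySem.Set (Int × Int)) (q : Int × Int),
      q ∈ group.foldl
          (fun lib pos =>
            (nearPositions pos.1 pos.2).foldl
              (fun lib n => if cell board n.1 n.2 == 0 then PySem.Set.add lib n else lib) lib)
          lib ↔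
        q ∈ lib ∨ ∃ p ∈ group, q ∈ nearPositions p.1 p.2 ∧ cell board q.1 q.2 = 0 := by
  induction group with
  | nil => intro lib q; simp
  | cons p g' ih =>
    intro lib q
    simp only [List.foldl_cons]
    rw [ih, mem_libInner]
    constructor
    · rintro ((h | ⟨h1, h2⟩) | ⟨p', hp', h1, h2⟩)
      · exact Or.inl h
      · exact Or.inr ⟨p, List.mem_cons_self .., h1, h2⟩
      · exact Or.inr ⟨p', List.mem_cons_of_mem _ hp', h1, h2⟩
    · rintro (h | ⟨p', hp', h1, h2⟩)
      · exact Or.inl (Or.inl h)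
      · rcases List.mem_cons.mp hp' with rfl | hp''
        · exact Or.inl (Or.inr ⟨h1, h2⟩)
        · exact Or.inr ⟨p', hp'', h1, h2⟩

theorem mem_getLibertySet (board : List (List Int)) (group : List (Int × Int)) (q : Int × Int) :
    q ∈ getLibertySet board group ↔
      ∃ p ∈ group, q ∈ nearPositions p.1 p.2 ∧ cell board q.1 q.2 = 0 := by
  unfold getLibertySet
  rw [mem_libOuter]
  simp [PySem.Set.empty]

theorem getLibertySet_nodup (board : List (List Int)) (group : List (Int × Int)) :
    (getLibertySet board group).Nodup := by
  unfold getLibertySet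
  refine foldl_inv _ _ (fun lib : PySem.Set (Int × Int) => lib.Nodup) ?_ _ (by simp [PySem.Set.empty])
  intro lib p _ hlib
  refine foldl_inv _ _ (fun lib : PySem.Set (Int × Int) => lib.Nodup) ?_ _ hlib
  intro lib' n _ hlib'
  dsimp only
  split
  · exact PySem.Set.nodup_add _ _ hlib'
  · exact hlib'

-- ---- B side: the inner fold ----

theorem fillFold_seen_mono (board : List (List Int)) (stone : Int) (l : List (Int × Int)) :
    ∀ (st : List (Int × Int)) (sn lb : PySem.Set (Int × Int)),
      ∀ c ∈ sn, c ∈ (l.foldl (fillStep board stone) (st, sn, lb)).2.1 := by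
  induction l with
  | nil => intro st sn lb c hc; simpa
  | cons n l' ih =>
    intro st sn lb c hc
    rw [List.foldl_cons, fillStep_eq]
    split_ifs with h1 h2
    · exact ih st sn _ c hc
    · exact ih _ _ _ c ((PySem.Set.mem_add ..).mpr (Or.inl hc))
    · exact ih _ _ _ c hc

theorem fillFold_lib_mono (board : List (List Int)) (stone : Int) (l : List (Int × Int)) :
    ∀ (st : List (Int × Int)) (sn lb : PySem.Set (Int × Int)),
      ∀ c ∈ lb, c ∈ (l.foldl (fillStep board stone) (st, sn, lb)).2.2 := by
  induction l with
  | nil => intro st sn lb c hc; simpa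
  | cons n l' ih =>
    intro st sn lb c hc
    rw [List.foldl_cons, fillStep_eq]
    split_ifs with h1 h2
    · exact ih _ _ _ c ((PySem.Set.mem_add ..).mpr (Or.inl hc))
    · exact ih _ _ _ c hc
    · exact ih _ _ _ c hc

theorem fillFold_stack_mono (board : List (List Int)) (stone : Int) (l : List (Int × Int)) :
    ∀ (st : List (Int × Int)) (sn lb : PySem.Set (Int × Int)),
      ∀ c ∈ st, c ∈ (l.foldl (fillStep board stone) (st, sn, lb)).1 := by
  induction l with
  | nil => intro st sn lb c hc; simpa
  | cons n l' ih =>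
    intro st sn lb c hc
    rw [List.foldl_cons, fillStep_eq]
    split_ifs with h1 h2
    · exact ih _ _ _ c hc
    · exact ih _ _ _ c (List.mem_cons_of_mem _ hc)
    · exact ih _ _ _ c hc

theorem fillFold_stack_src (board : List (List Int)) (stone : Int) (l : List (Int × Int)) :
    ∀ (st : List (Int × Int)) (sn lb : PySem.Set (Int × Int)),
      ∀ c ∈ (l.foldl (fillStep board stone) (st, sn, lb)).1, c ∈ st ∨ c ∈ l := by
  induction l with
  | nil => intro st sn lb c hc; exact Or.inl (by simpa using hc)
  | cons n l' ih =>
    intro st sn lb c hc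
    rw [List.foldl_cons, fillStep_eq] at hc
    split_ifs at hc with h1 h2
    · rcases ih _ _ _ c hc with h | h
      · exact Or.inl h
      · exact Or.inr (List.mem_cons_of_mem _ h)
    · rcases ih _ _ _ c hc with h | h
      · rcases List.mem_cons.mp h with rfl | h'
        · exact Or.inr (List.mem_cons_self ..)
        · exact Or.inl h'
      · exact Or.inr (List.mem_cons_of_mem _ h)
    · rcases ih _ _ _ c hc with h | h
      · exact Or.inl h
      · exact Or.inr (List.mem_cons_of_mem _ h)

theorem fillFold_seen_mem (board : List (List Int)) (stone : Int) (hstone : stone ≠ 0)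
    (l : List (Int × Int)) :
    ∀ (st : List (Int × Int)) (sn lb : PySem.Set (Int × Int)) (c : Int × Int),
      c ∈ (l.foldl (fillStep board stone) (st, sn, lb)).2.1 ↔
        c ∈ sn ∨ (c ∈ l ∧ cell board c.1 c.2 = stone) := by
  induction l with
  | nil => intro st sn lb c; simp
  | cons n l' ih =>
    intro st sn lb c
    rw [List.foldl_cons, fillStep_eq]
    split_ifs with h1 h2
    · -- cell n = 0
      have h0 : cell board n.1 n.2 = 0 := by simpa using h1
      rw [ih]
      constructor
      · rintro (h | ⟨hm, hcell⟩)
        · exact Or.inl h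
        · exact Or.inr ⟨List.mem_cons_of_mem _ hm, hcell⟩
      · rintro (h | ⟨hm, hcell⟩)
        · exact Or.inl h
        · rcases List.mem_cons.mp hm with rfl | h'
          · rw [h0] at hcell; exact absurd hcell.symm hstone
          · exact Or.inr ⟨h', hcell⟩
    · -- pushed
      obtain ⟨hceq, hnc⟩ := band_true.mp h2
      have hceq' : cell board n.1 n.2 = stone := by simpa using hceq
      rw [ih]
      constructor
      · rintro (h | ⟨hm, hcell⟩)
        · rcases (PySem.Set.mem_add ..).mp h with h' | rfl
          · exact Or.inl h'
          · exact Or.inr ⟨List.mem_cons_self .., hceq'⟩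
        · exact Or.inr ⟨List.mem_cons_of_mem _ hm, hcell⟩
      · rintro (h | ⟨hm, hcell⟩)
        · exact Or.inl ((PySem.Set.mem_add ..).mpr (Or.inl h))
        · rcases List.mem_cons.mp hm with rfl | h'
          · exact Or.inl ((PySem.Set.mem_add ..).mpr (Or.inr rfl))
          · exact Or.inr ⟨h', hcell⟩
    · -- skipped
      rw [ih]
      constructor
      · rintro (h | ⟨hm, hcell⟩)
        · exact Or.inl h
        · exact Or.inr ⟨List.mem_cons_of_mem _ hm, hcell⟩
      · rintro (h | ⟨hm, hcell⟩)
        · exact Or.inl h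
        · rcases List.mem_cons.mp hm with rfl | h'
          · -- c = n, cell n = stone but branch 2 failed → n ∈ sn
            by_cases hmem : PySem.Set.contains sn c = true
            · exact Or.inl ((PySem.Set.contains_iff sn c).mp hmem)
            · exfalso
              apply h2
              rw [band_true]
              have hcf : PySem.Set.contains sn c = false := by
                revert hmem; cases PySem.Set.contains sn c <;> simp
              rw [hcf]
              exact ⟨by simpa using hcell, rfl⟩
          · exact Or.inr ⟨h', hcell⟩

theorem fillFold_lib_mem (board : List (List Int)) (stone : Int) (l : List (Int × Int)) :
    ∀ (st : List (Int × Int)) (sn lb : PySem.Set (Int × Int)) (c : Int × Int),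
      c ∈ (l.foldl (fillStep board stone) (st, sn, lb)).2.2 ↔
        c ∈ lb ∨ (c ∈ l ∧ cell board c.1 c.2 = 0) := by
  induction l with
  | nil => intro st sn lb c; simp
  | cons n l' ih =>
    intro st sn lb c
    rw [List.foldl_cons, fillStep_eq]
    split_ifs with h1 h2
    · have h0 : cell board n.1 n.2 = 0 := by simpa using h1
      rw [ih]
      constructor
      · rintro (h | ⟨hm, hcell⟩)
        · rcases (PySem.Set.mem_add ..).mp h with h' | rfl
          · exact Or.inl h'
          · exact Or.inr ⟨List.mem_cons_self .., h0⟩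
        · exact Or.inr ⟨List.mem_cons_of_mem _ hm, hcell⟩
      · rintro (h | ⟨hm, hcell⟩)
        · exact Or.inl ((PySem.Set.mem_add ..).mpr (Or.inl h))
        · rcases List.mem_cons.mp hm with rfl | h'
          · exact Or.inl ((PySem.Set.mem_add ..).mpr (Or.inr rfl))
          · exact Or.inr ⟨h', hcell⟩
    · rw [ih]
      constructor
      · rintro (h | ⟨hm, hcell⟩)
        · exact Or.inl h
        · exact Or.inr ⟨List.mem_cons_of_mem _ hm, hcell⟩
      · rintro (h | ⟨hm, hcell⟩)
        · exact Or.inl h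
        · rcases List.mem_cons.mp hm with rfl | h'
          · exact absurd (by simpa using hcell : (cell board c.1 c.2 == 0) = true) (by simpa using h1)
          · exact Or.inr ⟨h', hcell⟩
    · rw [ih]
      constructor
      · rintro (h | ⟨hm, hcell⟩)
        · exact Or.inl h
        · exact Or.inr ⟨List.mem_cons_of_mem _ hm, hcell⟩
      · rintro (h | ⟨hm, hcell⟩)
        · exact Or.inl h
        · rcases List.mem_cons.mp hm with rfl | h'
          · exact absurd (by simpa using hcell : (cell board c.1 c.2 == 0) = true) (by simpa using h1)
          · exact Or.inr ⟨h', hcell⟩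

theorem fillFold_stack_sub_seen (board : List (List Int)) (stone : Int) (l : List (Int × Int)) :
    ∀ (st : List (Int × Int)) (sn lb : PySem.Set (Int × Int)), (∀ c ∈ st, c ∈ sn) →
      ∀ c ∈ (l.foldl (fillStep board stone) (st, sn, lb)).1,
        c ∈ (l.foldl (fillStep board stone) (st, sn, lb)).2.1 := by
  induction l with
  | nil => intro st sn lb h c hc; exact h c (by simpa using hc)
  | cons n l' ih =>
    intro st sn lb h
    rw [List.foldl_cons, fillStep_eq]
    split_ifs with h1 h2
    · exact ih _ _ _ h
    · refine ih _ _ _ ?_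
      intro c hc
      rcases List.mem_cons.mp hc with rfl | h'
      · exact (PySem.Set.mem_add ..).mpr (Or.inr rfl)
      · exact (PySem.Set.mem_add ..).mpr (Or.inl (h c h'))
    · exact ih _ _ _ h

theorem fillFold_new_seen_stack (board : List (List Int)) (stone : Int) (l : List (Int × Int)) :
    ∀ (st : List (Int × Int)) (sn lb : PySem.Set (Int × Int)),
      ∀ c ∈ (l.foldl (fillStep board stone) (st, sn, lb)).2.1,
        c ∈ sn ∨ c ∈ (l.foldl (fillStep board stone) (st, sn, lb)).1 := by
  induction l with
  | nil => intro st sn lb c hc; exact Or.inl (by simpa using hc)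
  | cons n l' ih =>
    intro st sn lb c hc
    rw [List.foldl_cons, fillStep_eq] at hc ⊢
    split_ifs with h1 h2
    · rw [if_pos h1] at hc
      exact ih _ _ _ c hc
    · rw [if_neg h1, if_pos h2] at hc
      rcases ih _ _ _ c hc with h | h
      · rcases (PySem.Set.mem_add ..).mp h with h' | rfl
        · exact Or.inl h'
        · exact Or.inr (fillFold_stack_mono board stone l' _ _ _ _ (List.mem_cons_self ..))
      · exact Or.inr h
    · rw [if_neg h1, if_neg h2] at hc
      exact ih _ _ _ c hc

theorem fillFold_nodup (board : List (List Int)) (stone : Int) (l : List (Int × Int)) :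
    ∀ (st : List (Int × Int)) (sn lb : PySem.Set (Int × Int)), sn.Nodup → lb.Nodup →
      (l.foldl (fillStep board stone) (st, sn, lb)).2.1.Nodup ∧
      (l.foldl (fillStep board stone) (st, sn, lb)).2.2.Nodup := by
  induction l with
  | nil => intro st sn lb h1 h2; exact ⟨by simpa, by simpa⟩
  | cons n l' ih =>
    intro st sn lb hsn hlb
    rw [List.foldl_cons, fillStep_eq]
    split_ifs with h1 h2
    · exact ih _ _ _ hsn (PySem.Set.nodup_add _ _ hlb)
    · exact ih _ _ _ (PySem.Set.nodup_add _ _ hsn) hlb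
    · exact ih _ _ _ hsn hlb

theorem fillFold_measure (board : List (List Int)) (stone : Int) (l : List (Int × Int))
    (hl : ∀ a ∈ l, a ∈ cellsList) :
    ∀ (st : List (Int × Int)) (sn lb : PySem.Set (Int × Int)),
      (l.foldl (fillStep board stone) (st, sn, lb)).1.length +
        2 * missing (l.foldl (fillStep board stone) (st, sn, lb)).2.1 ≤
      st.length + 2 * missing sn := by
  induction l with
  | nil => intro st sn lb; simp
  | cons n l' ih =>
    intro st sn lb
    rw [List.foldl_cons, fillStep_eq]
    have hl' : ∀ a ∈ l', a ∈ cellsList := fun a ha => hl a (List.mem_cons_of_mem _ ha)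
    split_ifs with h1 h2
    · exact ih hl' st sn _
    · obtain ⟨-, hnc⟩ := band_true.mp h2
      have hnmem : n ∉ sn := by
        intro hmem
        rw [(PySem.Set.contains_iff sn n).mpr hmem] at hnc
        simp at hnc
      have hlt : missing (PySem.Set.add sn n) < missing sn :=
        missing_add_lt (hl n (List.mem_cons_self ..)) hnmem
      have := ih hl' (n :: st) (PySem.Set.add sn n) lb
      simp only [List.length_cons] at this ⊢
      omega
    · exact ih hl' st sn lb

-- ---- B side: the loop ----

theorem fillLoop_mono (fuel : Nat) (board : List (List Int)) (stone : Int) :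
    ∀ (st : List (Int × Int)) (sn lb : PySem.Set (Int × Int)),
      (∀ c ∈ sn, c ∈ (fillLoop fuel board stone st sn lb).1) ∧
      (∀ c ∈ lb, c ∈ (fillLoop fuel board stone st sn lb).2) := by
  induction fuel with
  | zero => intro st sn lb; exact ⟨fun c hc => hc, fun c hc => hc⟩
  | succ f ih =>
    intro st sn lb
    cases st with
    | nil => exact ⟨fun c hc => hc, fun c hc => hc⟩
    | cons c0 st' =>
      rw [fillLoop_cons]
      constructor
      · intro c hc
        exact (ih _ _ _).1 c (fillFold_seen_mono board stone _ _ _ _ c hc)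
      · intro c hc
        exact (ih _ _ _).2 c (fillFold_lib_mono board stone _ _ _ _ c hc)

theorem fillLoop_nodup (fuel : Nat) (board : List (List Int)) (stone : Int) :
    ∀ (st : List (Int × Int)) (sn lb : PySem.Set (Int × Int)), sn.Nodup → lb.Nodup →
      (fillLoop fuel board stone st sn lb).1.Nodup ∧ (fillLoop fuel board stone st sn lb).2.Nodup := by
  induction fuel with
  | zero => intro st sn lb h1 h2; exact ⟨h1, h2⟩
  | succ f ih =>
    intro st sn lb h1 h2
    cases st with
    | nil => exact ⟨h1, h2⟩
    | cons c0 st' =>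
      rw [fillLoop_cons]
      obtain ⟨n1, n2⟩ := fillFold_nodup board stone (nearPositions c0.1 c0.2) st' sn lb h1 h2
      exact ih _ _ _ n1 n2

theorem fillLoop_sound (fuel : Nat) (board : List (List Int)) (stone : Int) (hstone : stone ≠ 0)
    (s : Int × Int) :
    ∀ (st : List (Int × Int)) (sn lb : PySem.Set (Int × Int)),
      (∀ p ∈ sn, Reach board stone s p) → (∀ p ∈ st, p ∈ sn) →
      (∀ q ∈ lb, LibSpec board stone s q) →
      (∀ p ∈ (fillLoop fuel board stone st sn lb).1, Reach board stone s p) ∧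
      (∀ q ∈ (fillLoop fuel board stone st sn lb).2, LibSpec board stone s q) := by
  induction fuel with
  | zero => intro st sn lb hsn hst hlb; exact ⟨hsn, hlb⟩
  | succ f ih =>
    intro st sn lb hsn hst hlb
    cases st with
    | nil => exact ⟨hsn, hlb⟩
    | cons c0 st' =>
      rw [fillLoop_cons]
      have hc0 : Reach board stone s c0 := hsn c0 (hst c0 (List.mem_cons_self ..))
      apply ih
      · intro p hp
        rcases (fillFold_seen_mem board stone hstone _ _ _ _ p).mp hp with h | ⟨hnear, hcell⟩
        · exact hsn p h
        · exact Relation.ReflTransGen.tail hc0 ⟨hnear, hcell⟩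
      · intro p hp
        exact fillFold_stack_sub_seen board stone _ _ _ _
          (fun c hc => hst c (List.mem_cons_of_mem _ hc)) p hp
      · intro q hq
        rcases (fillFold_lib_mem board stone _ _ _ _ q).mp hq with h | ⟨hnear, hcell⟩
        · exact hlb q h
        · exact ⟨c0, hc0, hnear, hcell⟩

theorem fillLoop_complete (fuel : Nat) (board : List (List Int)) (stone : Int) (hstone : stone ≠ 0) :
    ∀ (st : List (Int × Int)) (sn lb : PySem.Set (Int × Int)),
      st.length + 2 * missing sn ≤ fuel →
      (∀ p ∈ st, p ∈ sn) → (∀ a ∈ st, a ∈ cellsList) →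
      (∀ p ∈ sn, p ∈ st ∨
        (∀ q ∈ nearPositions p.1 p.2,
          (cell board q.1 q.2 = 0 → q ∈ lb) ∧ (cell board q.1 q.2 = stone → q ∈ sn))) →
      ∀ p ∈ (fillLoop fuel board stone st sn lb).1,
        ∀ q ∈ nearPositions p.1 p.2,
          (cell board q.1 q.2 = 0 → q ∈ (fillLoop fuel board stone st sn lb).2) ∧
          (cell board q.1 q.2 = stone → q ∈ (fillLoop fuel board stone st sn lb).1) := by
  induction fuel with
  | zero =>
    intro st sn lb hfuel hst hcells hproc p hp q hq
    have hst0 : st = [] := by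
      cases st with
      | nil => rfl
      | cons a l => simp [List.length_cons] at hfuel
    subst hst0
    rcases hproc p hp with h | h
    · cases h
    · exact h q hq
  | succ f ih =>
    intro st sn lb hfuel hst hcells hproc
    cases st with
    | nil =>
      intro p hp q hq
      rcases hproc p hp with h | h
      · cases h
      · exact h q hq
    | cons c0 st' =>
      rw [fillLoop_cons]
      have hnearcells : ∀ a ∈ nearPositions c0.1 c0.2, a ∈ cellsList :=
        fun a ha => mem_near_cells ha
      have hmeas := fillFold_measure board stone (nearPositions c0.1 c0.2) hnearcells st' sn lb
      apply ih
      · simp only [List.length_cons] at hfuel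
        omega
      · exact fillFold_stack_sub_seen board stone _ _ _ _
          (fun c hc => hst c (List.mem_cons_of_mem _ hc))
      · intro a ha
        rcases fillFold_stack_src board stone _ _ _ _ a ha with h | h
        · exact hcells a (List.mem_cons_of_mem _ h)
        · exact mem_near_cells h
      · intro p hp
        rcases fillFold_new_seen_stack board stone _ _ _ _ p hp with hpsn | hpst
        · rcases hproc p hpsn with h | h
          · rcases List.mem_cons.mp h with rfl | h'
            · right
              intro q hq
              constructor
              · intro h0
                exact (fillFold_lib_mem board stone _ _ _ _ q).mpr (Or.inr ⟨hq, h0⟩)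
              · intro hcell
                exact (fillFold_seen_mem board stone hstone _ _ _ _ q).mpr (Or.inr ⟨hq, hcell⟩)
            · exact Or.inl (fillFold_stack_mono board stone _ _ _ _ p h')
          · right
            intro q hq
            obtain ⟨ha, hb⟩ := h q hq
            constructor
            · intro h0
              exact fillFold_lib_mono board stone _ _ _ _ q (ha h0)
            · intro hcell
              exact fillFold_seen_mono board stone _ _ _ _ q (hb hcell)
        · exact Or.inl hpst

theorem fill_spec (board : List (List Int)) (stone : Int) (s : Int × Int)
    (hs : s ∈ cellsList) (hstone : stone ≠ 0) :
    (∀ q, q ∈ (fillLoop 200 board stone [s] (PySem.Set.add PySem.Set.empty s) PySem.Set.empty).2 ↔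
      LibSpec board stone s q) ∧
    (fillLoop 200 board stone [s] (PySem.Set.add PySem.Set.empty s) PySem.Set.empty).2.Nodup := by
  have hsn0 : PySem.Set.add PySem.Set.empty s = [s] := rfl
  rw [hsn0]
  have hmem_s : ∀ p ∈ ([s] : List (Int × Int)), p = s := by intro p hp; simpa using hp
  have hsound := fillLoop_sound 200 board stone hstone s [s] [s] PySem.Set.empty
    (fun p hp => by rw [hmem_s p hp]; exact Relation.ReflTransGen.refl)
    (fun p hp => hp) (fun q hq => by cases hq)
  have hcomplete := fillLoop_complete 200 board stone hstone [s] [s] PySem.Set.empty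
    (by have := missing_le [s]; simp only [List.length_cons, List.length_nil]; omega)
    (fun p hp => hp) (fun a ha => by rw [hmem_s a ha]; exact hs)
    (fun p hp => Or.inl hp)
  have hseen_complete : ∀ p, Reach board stone s p →
      p ∈ (fillLoop 200 board stone [s] [s] PySem.Set.empty).1 := by
    intro p hr
    induction hr with
    | refl => exact (fillLoop_mono 200 board stone [s] [s] PySem.Set.empty).1 s (by simp)
    | tail hab hadj ihb => exact (hcomplete _ ihb _ hadj.1).2 hadj.2
  constructor
  · intro q
    constructor
    · intro hq; exact hsound.2 q hq
    · rintro ⟨p, hr, hnear, h0⟩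
      exact (hcomplete p (hseen_complete p hr) q hnear).1 h0
  · exact (fillLoop_nodup 200 board stone [s] [s] PySem.Set.empty
      (List.nodup_singleton s) List.nodup_nil).2

-- ---- assembly ----

theorem liberty_len_eq (board : List (List Int)) (p : Int × Int)
    (hp : p ∈ cellsList) (hstone : cell board p.1 p.2 ≠ 0) :
    PySem.Set.len (getLibertySet board (getConnected 200 board PySem.Set.empty p.1 p.2)) =
    PySem.Set.len (fillLoop 200 board (cell board p.1 p.2) [p]
      (PySem.Set.add PySem.Set.empty p) PySem.Set.empty).2 := by
  obtain ⟨hfill, hfillnodup⟩ := fill_spec board (cell board p.1 p.2) p hp hstone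
  have hmemA : ∀ q, q ∈ getLibertySet board (getConnected 200 board PySem.Set.empty p.1 p.2) ↔
      LibSpec board (cell board p.1 p.2) p q := by
    intro q
    rw [mem_getLibertySet]
    constructor
    · rintro ⟨c, hc, hnear, h0⟩
      exact ⟨c, (getConnected_spec board p.1 p.2 hp c).mp hc, hnear, h0⟩
    · rintro ⟨c, hr, hnear, h0⟩
      exact ⟨c, (getConnected_spec board p.1 p.2 hp c).mpr hr, hnear, h0⟩
  have hperm : List.Perm (getLibertySet board (getConnected 200 board PySem.Set.empty p.1 p.2))
      (fillLoop 200 board (cell board p.1 p.2) [p]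
        (PySem.Set.add PySem.Set.empty p) PySem.Set.empty).2 := by
    rw [List.perm_ext_iff_of_nodup (getLibertySet_nodup board _) hfillnodup]
    intro a
    rw [hmemA a, hfill a]
  unfold PySem.Set.len
  rw [hperm.length_eq]

theorem loops_eq (board : List (List Int)) (turn : Int) (l : List (Int × Int))
    (hl : ∀ a ∈ l, a ∈ cellsList) :
    isCapturingGo board turn l = altLoop board turn l := by
  induction l with
  | nil => rfl
  | cons pos rest ih =>
    have hl' : ∀ a ∈ rest, a ∈ cellsList := fun a ha => hl a (List.mem_cons_of_mem _ ha)
    simp only [isCapturingGo, altLoop, isOpponentStone]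
    by_cases hcond : ((cell board pos.1 pos.2 == 1 || cell board pos.1 pos.2 == 2) &&
        !(cell board pos.1 pos.2 == turn)) = true
    · rw [if_pos hcond, if_pos hcond]
      have hstone : cell board pos.1 pos.2 ≠ 0 := by
        obtain ⟨h12, -⟩ := band_true.mp hcond
        rcases bor_true.mp h12 with h | h <;>
          · have := beq_iff_eq.mp h
            omega
      simp only [getLiberty, liberty_len_eq board pos (hl pos (List.mem_cons_self ..)) hstone]
      rw [ih hl']
    · rw [if_neg hcond, if_neg hcond]
      exact ih hl'

-- ===== VERDICT (by name: the statement is the Claim_ definition above) =====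
theorem IsCapturing_spec : Claim_equal_IsCapturing := by
  intro board turn x y _ _
  unfold Spec_IsCapturing IsCapturing IsCapturing_alt
  exact loops_eq board turn _ (fun a ha => mem_near_cells ha)
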